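-- pv_equiv track=rewrite | github.com/computer-science-with-applications/book | src/data_structures/dictionaries/solutions/practice_problems.py | count_unique_states_per_company
-- ===== SOURCE A (Python) =====
-- def count_unique_states_per_company(complaints):
--     """
--     For each company, count the number of different states
--     that had complaints.
--
--     Args:
--         complaints (List[Dict[str, str]) A list of complaints, where each
--             complaint is a dictionary
--
--     Returns (Dict[str, int]]): a dictionary maps a company name to
--       the number of different states that had a complaint for the
--       company.
--     """
--     # Built a intermediate data structure that maps company names
--     # to a set of the states that had complaints about that company.
--     states_per_company = {}
--     for complaint in complaints:
--         c = complaint["Company"]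
--         if c not in states_per_company:
--             states_per_company[c] = set()
--         states_per_company[c].add(complaint["State"])
--
--     # Build the final result
--     return { company : len(states) for company, states in states_per_company.items()}
-- ===== SOURCE B (Python) =====
-- def count_unique_states_per_company(complaints):
--     # One flat ordered set of distinct (company, state) pairs, then a tally pass.
--     pairs = dict.fromkeys((c["Company"], c["State"]) for c in complaints)
--     counts = {}
--     for company, _state in pairs:
--         counts[company] = counts.get(company, 0) + 1
--     return counts
-- ===== Notes on version B (the rewrite author's own statement) =====
-- stated objective: idiomatic
-- what changed: B replaces A's dict of per-company state sets (whose lengths are read off at the end) by one flat ordered set of distinct (company, state) pairs built in a single dedup pass, followed by a separate tally pass that counts each company's pairs.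
import Mathlib
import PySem

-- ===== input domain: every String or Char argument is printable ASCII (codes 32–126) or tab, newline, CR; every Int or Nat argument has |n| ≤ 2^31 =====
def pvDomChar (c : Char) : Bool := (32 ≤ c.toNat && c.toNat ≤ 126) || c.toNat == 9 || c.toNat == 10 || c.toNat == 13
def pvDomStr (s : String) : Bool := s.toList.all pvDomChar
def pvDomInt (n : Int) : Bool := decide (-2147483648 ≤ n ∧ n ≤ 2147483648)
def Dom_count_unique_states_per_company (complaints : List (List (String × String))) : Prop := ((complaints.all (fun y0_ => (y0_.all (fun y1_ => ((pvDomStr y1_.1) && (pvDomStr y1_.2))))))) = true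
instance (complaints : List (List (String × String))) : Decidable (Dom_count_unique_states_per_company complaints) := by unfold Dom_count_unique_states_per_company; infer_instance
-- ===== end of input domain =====

-- B replaces A's dict of per-company state sets by one flat ordered set of distinct
-- (company, state) pairs followed by a per-company tally pass (idiomatic, same cost).


-- shared input access: complaint["Company"] / complaint["State"]; under Pre_ the key is
-- present, so the "" default is never reached (Python raises KeyError exactly there).
def pvGetField (c : List (String × String)) (k : String) : String :=
  (PySem.Dict.ofList c).getD k ""

-- ===== PORT A =====
def count_unique_states_per_company (complaints : List (List (String × String))) : List (String × Int) :=
  let states_per_company : PySem.Dict String (PySem.Set String) :=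
    complaints.foldl
      (fun d complaint =>
        let c := pvGetField complaint "Company"
        let d := if d.contains c then d else d.insert c PySem.Set.empty
        d.modify c PySem.Set.empty (fun s => PySem.Set.add s (pvGetField complaint "State")))
      PySem.Dict.empty
  states_per_company.items.map (fun p => (p.1, (PySem.Set.len p.2 : Int)))

-- ===== PORT B =====
def count_unique_states_per_company_alt (complaints : List (List (String × String))) : List (String × Int) :=
  let pairs : List (String × String) :=
    PySem.List.dedup (complaints.map (fun c => (pvGetField c "Company", pvGetField c "State")))
  let counts : PySem.Dict String Int :=
    pairs.foldl (fun d p => d.modify p.1 0 (· + 1)) PySem.Dict.empty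
  counts.items

-- ===== PRECONDITION & SPEC =====
-- Pre_ excludes exactly the complaints missing a "Company" or "State" key, on which Python A raises KeyError.
def Pre_count_unique_states_per_company (complaints : List (List (String × String))) : Prop :=
  (complaints.all (fun c => c.any (fun p => p.1 == "Company") && c.any (fun p => p.1 == "State"))) = true
instance (complaints : List (List (String × String))) : Decidable (Pre_count_unique_states_per_company complaints) := by unfold Pre_count_unique_states_per_company; infer_instance

def pvWitness_count_unique_states_per_company : (List (List (String × String))) :=
  [[("Company", "Acme"), ("State", "TX")], [("Company", "Acme"), ("State", "IL")]]

def Spec_count_unique_states_per_company (complaints : List (List (String × String))) (out : List (String × Int)) : Prop := out = count_unique_states_per_company_alt complaints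
instance (complaints : List (List (String × String))) (out : List (String × Int)) : Decidable (Spec_count_unique_states_per_company complaints out) := by unfold Spec_count_unique_states_per_company; infer_instance

-- ===== CLAIM (what is proved, stated in full; the proofs are below) =====
def Claim_equal_count_unique_states_per_company : Prop := ∀ (complaints : List (List (String × String))), Dom_count_unique_states_per_company complaints → Pre_count_unique_states_per_company complaints → Spec_count_unique_states_per_company complaints (count_unique_states_per_company complaints)

-- ===== LEMMAS AND PROOFS =====

theorem stepA_eq (d : PySem.Dict String (PySem.Set String)) (c st : String) :
    (let d' := if d.contains c then d else d.insert c PySem.Set.empty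
     d'.modify c PySem.Set.empty (fun s => PySem.Set.add s st))
    = d.modify c PySem.Set.empty (fun s => PySem.Set.add s st) := by
  show (if d.contains c then d else d.insert c PySem.Set.empty).modify c PySem.Set.empty (fun s => PySem.Set.add s st) = _
  by_cases h : d.contains c
  · simp [h]
  · simp only [h]
    show (d.insert c PySem.Set.empty).insert c _ = d.insert c _
    rw [PySem.Dict.insert_insert_self]
    congr 1
    have h2 : d.contains c = false := by simpa using h
    simp [PySem.Dict.getD_insert_self, PySem.Dict.getD_of_not_contains, h2, PySem.Set.add, PySem.Set.contains]

theorem getD_foldl_modify_add (l : List (String × String)) (d : PySem.Dict String (PySem.Set String)) (c : String) :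
    (l.foldl (fun d p => d.modify p.1 PySem.Set.empty (fun s => PySem.Set.add s p.2)) d).getD c PySem.Set.empty
    = PySem.Set.update (d.getD c PySem.Set.empty) ((l.filter (fun p => p.1 == c)).map (·.2)) := by
  induction l generalizing d with
  | nil => simp [PySem.Set.update]
  | cons p l ih =>
    simp only [List.foldl_cons, ih, List.filter_cons]
    by_cases h : p.1 = c
    · simp [h, PySem.Set.update_cons]
    · simp [PySem.Dict.getD_modify, Ne.symm h, h]

theorem filter_discard {α : Type} [BEq α] [LawfulBEq α] (p : α → Bool) (s : List α) (x : α) :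
    (PySem.Set.discard s x).filter p = PySem.Set.discard (s.filter p) x := by
  show (s.filter _).filter p = (s.filter p).filter _
  rw [List.filter_filter, List.filter_filter]
  apply List.filter_congr; intro a _; simp [Bool.and_comm]

theorem discard_of_not_mem {α : Type} [BEq α] [LawfulBEq α] {s : List α} {x : α} (h : x ∉ s) :
    PySem.Set.discard s x = s := by
  rw [PySem.Set.discard]
  apply List.filter_eq_self.2
  intro a ha
  have hne : a ≠ x := fun he => h (he ▸ ha)
  simp [hne]

theorem ofList_filter {α : Type} [BEq α] [LawfulBEq α] (p : α → Bool) (xs : List α) :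
    PySem.Set.ofList (xs.filter p) = (PySem.Set.ofList xs).filter p := by
  induction xs with
  | nil => rfl
  | cons x xs ih =>
    by_cases h : p x
    · rw [List.filter_cons, if_pos (by simp [h]), PySem.Set.ofList_cons, PySem.Set.ofList_cons,
        List.filter_cons, if_pos (by simp [h]), ih, filter_discard]
    · rw [List.filter_cons, if_neg (by simp [h]), PySem.Set.ofList_cons,
        List.filter_cons, if_neg (by simp [h]), ih, filter_discard,
        discard_of_not_mem (by simp [List.mem_filter, h])]

theorem map_ofList_of_inj {α β : Type} [BEq α] [LawfulBEq α] [BEq β] [LawfulBEq β] (f : α → β) (xs : List α)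
    (hinj : ∀ a ∈ xs, ∀ b ∈ xs, f a = f b → a = b) :
    (PySem.Set.ofList xs).map f = PySem.Set.ofList (xs.map f) := by
  induction xs with
  | nil => rfl
  | cons x xs ih =>
    rw [PySem.Set.ofList_cons, List.map_cons, List.map_cons, PySem.Set.ofList_cons]
    rw [← ih (fun a ha b hb => hinj a (by simp [ha]) b (by simp [hb]))]
    congr 1
    rw [PySem.Set.discard, PySem.Set.discard, List.filter_map]
    congr 1
    apply List.filter_congr
    intro a ha
    have ha' : a ∈ xs := (PySem.Set.mem_ofList _ _).1 ha
    by_cases he : a = x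
    · simp [he]
    · have hfe : f a ≠ f x := fun h => he (hinj a (by simp [ha']) x (by simp) h)
      simp [he, hfe]

theorem ofList_map_ofList {α β : Type} [BEq α] [LawfulBEq α] [BEq β] [LawfulBEq β] (f : α → β) (xs : List α) :
    PySem.Set.ofList ((PySem.Set.ofList xs).map f) = PySem.Set.ofList (xs.map f) := by
  induction xs using List.reverseRecOn with
  | nil => rfl
  | append_singleton xs x ih =>
    rw [List.map_append, List.map_singleton, PySem.Set.ofList_append_singleton,
        PySem.Set.ofList_append_singleton]
    by_cases h : x ∈ PySem.Set.ofList xs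
    · rw [PySem.Set.add_of_mem h, ih]
      rw [PySem.Set.add_of_mem]
      rw [PySem.Set.mem_ofList]
      exact List.mem_map_of_mem ((PySem.Set.mem_ofList _ _).1 h)
    · rw [PySem.Set.add_of_not_mem h, List.map_append, List.map_singleton,
        PySem.Set.ofList_append_singleton, ih]

theorem count_eq_len (P : List (String × String)) (k : String) :
    ((PySem.List.dedup P).map (·.1)).count k
    = (PySem.Set.ofList ((P.filter (fun p => p.1 == k)).map (·.2))).length := by
  have hinj : ∀ a ∈ P.filter (fun p => p.1 == k), ∀ b ∈ P.filter (fun p => p.1 == k),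
      a.2 = b.2 → a = b := by
    intro a ha b hb h2
    have ha1 : a.1 = k := by simpa using (List.mem_filter.1 ha).2
    have hb1 : b.1 = k := by simpa using (List.mem_filter.1 hb).2
    exact Prod.ext (ha1.trans hb1.symm) h2
  rw [← map_ofList_of_inj _ _ hinj, List.length_map, ofList_filter]
  rw [PySem.List.dedup_eq_ofList, List.count_eq_countP, List.countP_map,
      List.countP_eq_length_filter]
  simp only [Function.comp_def]

theorem A_eq_B_over_pairs (P : List (String × String)) :
    ((P.foldl (fun d p => d.modify p.1 PySem.Set.empty (fun s => PySem.Set.add s p.2)) PySem.Dict.empty).items.map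
      (fun p => (p.1, (PySem.Set.len p.2 : Int))))
    = ((PySem.List.dedup P).foldl (fun (d : PySem.Dict String Int) p => d.modify p.1 0 (· + 1)) PySem.Dict.empty).items := by
  have hB : (PySem.List.dedup P).foldl (fun (d : PySem.Dict String Int) p => d.modify p.1 0 (· + 1)) PySem.Dict.empty
      = PySem.Dict.counter ((PySem.List.dedup P).map (·.1)) := by
    rw [PySem.Dict.counter_eq_foldl, List.foldl_map]
  rw [hB, PySem.Dict.items_counter]
  have hnd : (P.foldl (fun d p => d.modify p.1 PySem.Set.empty (fun s => PySem.Set.add s p.2)) PySem.Dict.empty).keys.Nodup :=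
    PySem.Dict.nodup_keys_foldl_modify_key P (·.1) PySem.Set.empty (fun _ p s => PySem.Set.add s p.2) PySem.Dict.empty PySem.Dict.nodup_keys_empty
  rw [PySem.Dict.items_eq_map_keys _ hnd PySem.Set.empty, List.map_map]
  have hkeys : (P.foldl (fun d p => d.modify p.1 PySem.Set.empty (fun s => PySem.Set.add s p.2)) PySem.Dict.empty).keys
      = PySem.Set.ofList (P.map (·.1)) := by
    rw [PySem.Dict.keys_foldl_modify_key, PySem.Dict.keys_empty, PySem.Set.update_nil_left]
  rw [hkeys, PySem.List.dedup_eq_ofList, ofList_map_ofList, ← PySem.List.dedup_eq_ofList]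
  apply List.map_congr_left
  intro k _
  simp only [Function.comp_apply]
  refine Prod.ext rfl ?_
  show (PySem.Set.len ((P.foldl (fun d p => d.modify p.1 PySem.Set.empty (fun s => PySem.Set.add s p.2)) PySem.Dict.empty).getD k PySem.Set.empty) : Int) = _
  rw [getD_foldl_modify_add, PySem.Dict.getD_empty]
  have hupd : PySem.Set.update PySem.Set.empty ((P.filter (fun p => p.1 == k)).map (·.2))
      = PySem.Set.ofList ((P.filter (fun p => p.1 == k)).map (·.2)) := PySem.Set.update_nil_left _
  rw [hupd]
  have hc := count_eq_len P k
  rw [PySem.List.dedup_eq_ofList] at hc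
  show ((PySem.Set.ofList ((P.filter (fun p => p.1 == k)).map (·.2))).length : Int) = _
  rw [← hc]

theorem A_eq_B_final (complaints : List (List (String × String))) :
    count_unique_states_per_company complaints = count_unique_states_per_company_alt complaints := by
  unfold count_unique_states_per_company count_unique_states_per_company_alt
  have hA : complaints.foldl
      (fun d complaint =>
        let c := pvGetField complaint "Company"
        let d := if d.contains c then d else d.insert c PySem.Set.empty
        d.modify c PySem.Set.empty (fun s => PySem.Set.add s (pvGetField complaint "State")))
      PySem.Dict.empty
      = (complaints.map (fun c => (pvGetField c "Company", pvGetField c "State"))).foldl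
          (fun d p => d.modify p.1 PySem.Set.empty (fun s => PySem.Set.add s p.2)) PySem.Dict.empty := by
    rw [List.foldl_map]
    congr 1
    funext d complaint
    exact stepA_eq d (pvGetField complaint "Company") (pvGetField complaint "State")
  simp only [hA]
  exact A_eq_B_over_pairs _

-- ===== VERDICT (by name: the statement is the Claim_ definition above) =====
theorem count_unique_states_per_company_spec : Claim_equal_count_unique_states_per_company := by
  intro complaints _ _
  exact A_eq_B_final complaints
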